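-- pv_equiv track=rewrite | github.com/LumiiAI/lumii-ai-tutor_-2 | app15.2.py | is_polite_decline
-- ===== SOURCE A (Python) =====
-- def is_polite_decline(message):
--     """Detect polite declines that shouldn't end conversation"""
--     message_lower = message.lower().strip()
--
--     polite_declines = [
--         "no thanks", "not now", "maybe later", "not right now",
--         "no thank you", "i'm good", "i'm ok", "not today",
--         "maybe tomorrow", "later", "nah", "no"
--     ]
--
--     # Only consider it a polite decline if it's EXACTLY one of these phrases
--     # or starts with one followed by minimal words
--     for decline in polite_declines:
--         if message_lower == decline:
--             return True
--         if message_lower.startswith(decline + " ") and len(message_lower) < len(decline) + 20: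
--             return True
--
--     return False
-- ===== SOURCE B (Python) =====
-- _PHRASES = frozenset([
--     "no thanks", "not now", "maybe later", "not right now",
--     "no thank you", "i'm good", "i'm ok", "not today",
--     "maybe tomorrow", "later", "nah", "no"
-- ])
--
-- def is_polite_decline(message):
--     """Detect polite declines that shouldn't end conversation"""
--     message_lower = message.lower().strip()
--     if message_lower in _PHRASES:
--         return True
--     return any(ch == ' ' and message_lower[:i] in _PHRASES and len(message_lower) < i + 20
--                for i, ch in enumerate(message_lower))
-- ===== Notes on version B (the rewrite author's own statement) =====
-- stated objective: idiomatic
-- what changed: Instead of looping over the 12 phrases testing equality and startswith per phrase, B does one frozenset membership test on the whole message and one pass over the message's characters, testing each space-bounded prefix against the set.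
import Mathlib
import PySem

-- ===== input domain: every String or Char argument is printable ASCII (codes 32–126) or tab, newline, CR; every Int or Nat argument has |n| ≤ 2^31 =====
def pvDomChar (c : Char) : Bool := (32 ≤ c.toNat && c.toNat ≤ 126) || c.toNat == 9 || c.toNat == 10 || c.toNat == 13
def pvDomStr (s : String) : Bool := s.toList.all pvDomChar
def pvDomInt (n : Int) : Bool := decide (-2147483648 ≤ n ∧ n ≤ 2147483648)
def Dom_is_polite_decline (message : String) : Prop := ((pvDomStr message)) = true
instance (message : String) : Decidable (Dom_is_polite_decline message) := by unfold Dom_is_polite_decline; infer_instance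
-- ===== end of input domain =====

-- B replaces A's per-phrase equality/startswith loop by one set-membership test plus one
-- enumerate pass over the message testing each space-bounded prefix against the phrase set (idiomatic).

-- ===== PORT A =====
def pvPhrases : List (List Char) :=
  ["no thanks".toList, "not now".toList, "maybe later".toList, "not right now".toList,
   "no thank you".toList, "i'm good".toList, "i'm ok".toList, "not today".toList,
   "maybe tomorrow".toList, "later".toList, "nah".toList, "no".toList]

-- A's for-loop with early return
def pvLoopA (ml : List Char) : List (List Char) → Bool
  | [] => false
  | d :: ds =>
    if ml = d then true
    else if PySem.Chars.startswith ml (d ++ [' ']) = true ∧ PySem.Chars.len ml < PySem.Chars.len d + 20 then true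
    else pvLoopA ml ds

def is_polite_decline (message : String) : Bool :=
  pvLoopA (PySem.Chars.strip (PySem.Chars.lower message.toList)) pvPhrases

-- ===== PORT B =====
def pvPhraseSet : PySem.Set (List Char) :=
  PySem.Set.ofList
    ["no thanks".toList, "not now".toList, "maybe later".toList, "not right now".toList,
     "no thank you".toList, "i'm good".toList, "i'm ok".toList, "not today".toList,
     "maybe tomorrow".toList, "later".toList, "nah".toList, "no".toList]

def is_polite_decline_alt (message : String) : Bool :=
  let ml := PySem.Chars.strip (PySem.Chars.lower message.toList)
  if PySem.Set.contains pvPhraseSet ml then true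
  else
    (PySem.List.enumerate ml 0).any (fun p =>
      p.2 == ' '
        && PySem.Set.contains pvPhraseSet (PySem.List.slice ml none (some p.1))
        && decide ((PySem.Chars.len ml : Int) < p.1 + 20))

-- ===== PRECONDITION & SPEC =====
def Spec_is_polite_decline (message : String) (out : Bool) : Prop := out = is_polite_decline_alt message
instance (message : String) (out : Bool) : Decidable (Spec_is_polite_decline message out) := by unfold Spec_is_polite_decline; infer_instance

-- ===== CLAIM (what is proved, stated in full; the proofs are below) =====
def Claim_equal_is_polite_decline : Prop := ∀ (message : String), Dom_is_polite_decline message → Spec_is_polite_decline message (is_polite_decline message)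

-- ===== LEMMAS AND PROOFS =====

-- membership in the phrase set is plain list membership (the 12 phrases are distinct)
lemma pv_contains_iff (x : List Char) :
    PySem.Set.contains pvPhraseSet x = true ↔ x ∈ pvPhrases := by
  have h : pvPhraseSet = pvPhrases := by decide
  rw [h]
  simp [PySem.Set.contains]

-- A's loop succeeds iff some phrase matches A's per-phrase condition
lemma pvLoopA_iff (ml : List Char) (ds : List (List Char)) :
    pvLoopA ml ds = true ↔
      ∃ d ∈ ds, ml = d ∨ ((d ++ [' ']) <+: ml ∧ ml.length < d.length + 20) := by
  induction ds with
  | nil => simp [pvLoopA]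
  | cons d ds ih =>
    simp only [pvLoopA]
    split_ifs with h1 h2
    · simp [h1]
    · rcases h2 with ⟨hs, hl⟩
      rw [PySem.Chars.startswith_iff] at hs
      simp only [PySem.Chars.len_eq] at hl
      simp only [true_iff]
      exact ⟨d, by simp, Or.inr ⟨hs, by exact_mod_cast hl⟩⟩
    · rw [ih]
      constructor
      · rintro ⟨e, he, hp⟩; exact ⟨e, by simp [he], hp⟩
      · rintro ⟨e, he, hp⟩
        rcases List.mem_cons.mp he with rfl | he'
        · rcases hp with rfl | ⟨hs, hl⟩
          · exact absurd rfl h1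
          · refine absurd ⟨Iff.mpr (PySem.Chars.startswith_iff ..) hs, ?_⟩ h2
            simp only [PySem.Chars.len_eq]
            exact_mod_cast hl
        · exact ⟨e, he', hp⟩

-- "ml starts with d followed by a space", read off at position d.length
lemma pv_prefix_space_iff (d ml : List Char) :
    (d ++ [' ']) <+: ml ↔
      ∃ k, ∃ h : k < ml.length, ml[k] = ' ' ∧ ml.take k = d := by
  constructor
  · rintro ⟨t, ht⟩
    have hml : ml = d ++ ' ' :: t := by rw [← ht]; simp
    subst hml
    refine ⟨d.length, by simp, ?_, ?_⟩
    · simp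
    · simp
  · rintro ⟨k, hk, hsp, htk⟩
    have : ml.take (k + 1) = d ++ [' '] := by
      rw [List.take_add_one, htk]
      simp [List.getElem?_eq_getElem hk, hsp]
    calc d ++ [' '] = ml.take (k+1) := this.symm
      _ <+: ml := List.take_prefix _ _

-- B's enumerate pass succeeds iff some space-bounded prefix is a phrase and the length guard holds
lemma pv_any_iff (ml : List Char) :
    ((PySem.List.enumerate ml 0).any (fun p =>
      p.2 == ' '
        && PySem.Set.contains pvPhraseSet (PySem.List.slice ml none (some p.1))
        && decide ((PySem.Chars.len ml : Int) < p.1 + 20))) = true ↔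
      ∃ k, ∃ h : k < ml.length, ml[k] = ' ' ∧ ml.take k ∈ pvPhrases ∧ ml.length < k + 20 := by
  rw [List.any_eq_true]
  constructor
  · rintro ⟨p, hp, hcond⟩
    rcases Iff.mp (PySem.List.mem_enumerate_iff ..) hp with ⟨k, hk, rfl⟩
    simp only [zero_add, Bool.and_eq_true, beq_iff_eq, decide_eq_true_eq] at hcond
    rcases hcond with ⟨⟨hsp, hmem⟩, hlen⟩
    refine ⟨k, hk, hsp, ?_, ?_⟩
    · rw [← pv_contains_iff]
      rw [PySem.List.slice_to_natCast] at hmem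
      exact hmem
    · simp only [PySem.Chars.len_eq] at hlen
      exact_mod_cast hlen
  · rintro ⟨k, hk, hsp, hmem, hlen⟩
    refine ⟨((k : Int), ml[k]), ?_, ?_⟩
    · exact Iff.mpr (PySem.List.mem_enumerate_iff ..) ⟨k, hk, by simp⟩
    · simp only [Bool.and_eq_true, beq_iff_eq, decide_eq_true_eq]
      refine ⟨⟨hsp, ?_⟩, ?_⟩
      · rw [PySem.List.slice_to_natCast]
        exact (pv_contains_iff _).mpr hmem
      · simp only [PySem.Chars.len_eq]
        exact_mod_cast hlen

lemma pv_main (ml : List Char) :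
    pvLoopA ml pvPhrases =
      (if PySem.Set.contains pvPhraseSet ml then true
       else (PySem.List.enumerate ml 0).any (fun p =>
        p.2 == ' '
          && PySem.Set.contains pvPhraseSet (PySem.List.slice ml none (some p.1))
          && decide ((PySem.Chars.len ml : Int) < p.1 + 20))) := by
  by_cases hml : PySem.Set.contains pvPhraseSet ml = true
  · rw [if_pos hml]
    rw [pvLoopA_iff]
    exact ⟨ml, (pv_contains_iff ml).mp hml, Or.inl rfl⟩
  · rw [if_neg hml]
    have hnm : ml ∉ pvPhrases := fun h => hml ((pv_contains_iff ml).mpr h)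
    rw [Bool.eq_iff_iff, pvLoopA_iff, pv_any_iff]
    constructor
    · rintro ⟨d, hd, rfl | ⟨hpre, hlen⟩⟩
      · exact absurd hd hnm
      · rcases (pv_prefix_space_iff d ml).mp hpre with ⟨k, hk, hsp, htk⟩
        have hdl : d.length = k := by
          rw [← htk, List.length_take]; omega
        exact ⟨k, hk, hsp, htk ▸ hd, by omega⟩
    · rintro ⟨k, hk, hsp, hmem, hlen⟩
      refine ⟨ml.take k, hmem, Or.inr ⟨?_, ?_⟩⟩
      · exact (pv_prefix_space_iff _ ml).mpr ⟨k, hk, hsp, rfl⟩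
      · rw [List.length_take]; omega

-- ===== VERDICT (by name: the statement is the Claim_ definition above) =====
theorem is_polite_decline_spec : Claim_equal_is_polite_decline := by
  intro message _
  unfold Spec_is_polite_decline is_polite_decline is_polite_decline_alt
  exact pv_main _
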